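/- GENERATED by c/gen_decode.py: decode facts of the image, one per distinct instruction byte string. -/
import UserX.DecodeImage

#decode_all Vorbis.Dec
  "0f5705f4460100"  -- xorps xmm0,XMMWORD PTR [rip+0x146f4]
  "0f8499000000"  -- je 114ef9
  "0f8561010000"  -- jne 113daf
  "0f8d5d010000"  -- jge 110e74
  "0fafc6"  -- imul eax,esi
  "0fbfc3"  -- movsx eax,bx
  "3c43"  -- cmp al,0x43
  "410fb6c7"  -- movzx eax,r15b
  "4181fcff030000"  -- cmp r12d,0x3ff
  "41899ef8060000"  -- mov DWORD PTR [r14+0x6f8],ebx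
  "418d45ff"  -- lea eax,[r13-0x1]
  "41d3ef"  -- shr r15d,cl
  "440fbf442410"  -- movsx r8d,WORD PTR [rsp+0x10]
  "448833"  -- mov BYTE PTR [rbx],r14b
  "4489a3e0060000"  -- mov DWORD PTR [rbx+0x6e0],r12d
  "448b6500"  -- mov r12d,DWORD PTR [rbp+0x0]
  "448bbde4060000"  -- mov r15d,DWORD PTR [rbp+0x6e4]
  "45886c2406"  -- mov BYTE PTR [r12+0x6],r13b
  "458b7c24f4"  -- mov r15d,DWORD PTR [r12-0xc]
  "480fafd8"  -- imul rbx,rax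
  "4863df"  -- movsxd rbx,edi
  "4883c701"  -- add rdi,0x1
  "48895c2408"  -- mov QWORD PTR [rsp+0x8],rbx
  "488b342508f01f00"  -- mov rsi,QWORD PTR ds:0x1ff008
  "488b8558ffffff"  -- mov rax,QWORD PTR [rbp-0xa8]
  "488d4c2430"  -- lea rcx,[rsp+0x30]
  "488d7c0504"  -- lea rdi,[rbp+rax*1+0x4]
  "488dbb34060000"  -- lea rdi,[rbx+0x634]
  "488dbd30080000"  -- lea rdi,[rbp+0x830]
  "48c70424b38ab541"  -- mov QWORD PTR [rsp],0x41b58ab3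
  "49035f08"  -- add rbx,QWORD PTR [r15+0x8]
  "4983ed01"  -- sub r13,0x1
  "498d3c5c"  -- lea rdi,[r12+rbx*2]
  "498d9444e4010000"  -- lea rdx,[r12+rax*2+0x1e4]
  "4a8944fb08"  -- mov QWORD PTR [rbx+r15*8+0x8],rax
  "4c01eb"  -- add rbx,r13
  "4c896c2408"  -- mov QWORD PTR [rsp+0x8],r13
  "4c8b6b70"  -- mov r13,QWORD PTR [rbx+0x70]
  "4c8d4c2430"  -- lea r9,[rsp+0x30]
  "4d69e43c060000"  -- imul r12,r12,0x63c
  "4e8d24e8"  -- lea r12,[rax+r13*8]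
  "660f7ec3"  -- movd ebx,xmm0
  "664289447b02"  -- mov WORD PTR [rbx+r15*2+0x2],ax
  "7312"  -- jae 115ab0
  "7469"  -- je 10d4f6
  "75ac"  -- jne 11579e
  "7ccd"  -- jl 104908
  "7f04"  -- jg 108797
  "81ebfe070000"  -- sub ebx,0x7fe
  "83e804"  -- sub eax,0x4
  "894c2404"  -- mov DWORD PTR [rsp+0x4],ecx
  "89ab84000000"  -- mov DWORD PTR [rbx+0x84],ebp
  "8b442448"  -- mov eax,DWORD PTR [rsp+0x48]
  "8b8338060000"  -- mov eax,DWORD PTR [rbx+0x638]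
  "8d4f06"  -- lea ecx,[rdi+0x6]
  "be18000000"  -- mov esi,0x18
  "c744240400000000"  -- mov DWORD PTR [rsp+0x4],0x0
  "c783ec00c000f3f3f3f3"  -- mov DWORD PTR [rbx+0xc000ec],0xf3f3f3f3
  "e805ebfeff"  -- call 100640
  "e80f67ffff"  -- call 10b100
  "e8190fffff"  -- call 103d00
  "e8231effff"  -- call 100640
  "e82bfefeff"  -- call 103d00
  "e83672ffff"  -- call 100640
  "e84130ffff"  -- call 100640
  "e84a79ffff"  -- call 100480
  "e8563effff"  -- call 108f20
  "e8639fffff"  -- call 100640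
  "e86eb8feff"  -- call 100560
  "e879f3feff"  -- call 103d00
  "e8858affff"  -- call 10d1c0
  "e88fbaffff"  -- call 100720
  "e899acfeff"  -- call 100480
  "e8a480ffff"  -- call 100300
  "e8aed5feff"  -- call 103d00
  "e8b7effeff"  -- call 100800
  "e8c2acffff"  -- call 100640
  "e8cba6ffff"  -- call 100640
  "e8d676ffff"  -- call 10b8e0
  "e8e0b1feff"  -- call 100560
  "e8e9f6feff"  -- call 100300
  "e8f1b0feff"  -- call 100640
  "e8fcfefeff"  -- call 103d00
  "e933ffffff"  -- jmp 10fa53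
  "e978ffffff"  -- jmp 10c907
  "e9d1020000"  -- jmp 110f3b
  "eb32"  -- jmp 101252
  "ebc0"  -- jmp 109860
  "f20f10442430"  -- movsd xmm0,QWORD PTR [rsp+0x30]
  "f20f59ca"  -- mulsd xmm1,xmm2
  "f30f103b"  -- movss xmm7,DWORD PTR [rbx]
  "f30f1064241c"  -- movss xmm4,DWORD PTR [rsp+0x1c]
  "f30f1143fc"  -- movss DWORD PTR [rbx-0x4],xmm0
  "f30f1165a4"  -- movss DWORD PTR [rbp-0x5c],xmm4
  "f30f5845b0"  -- addss xmm0,DWORD PTR [rbp-0x50]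
  "f30f5965c0"  -- mulss xmm4,DWORD PTR [rbp-0x40]
  "f30f5cdf"  -- subss xmm3,xmm7
  "f3410f114424fc"  -- movss DWORD PTR [r12-0x4],xmm0
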